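-- pv_equiv track=rewrite | github.com/routifai/meta-builder | agent/mesh/researcher.py | _extract_domains
-- ===== SOURCE A (Python) =====
-- _INTEGRATION_TO_DOMAIN: dict[str, str] = {
--     "perplexity": "perplexity-api",
--     "openai": "openai-api",
--     "github": "github-api",
--     "slack": "slack-api",
--     "stripe": "stripe-api",
--     "postgres": "postgres",
--     "redis": "redis-state",
--     "anthropic": "anthropic-sdk",
--     "fly": "fly-workers",
--     "docker": "docker",
-- }
--
-- _BUILD_TARGET_TO_DOMAIN: dict[str, str] = {
--     "mcp-server": "mcp-protocol",
--     "rest-api": "fastapi",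
--     "cli-tool": "python-cli",
--     "web-app": "fastapi",
--     "python-library": "python-library",
--     "graphql-api": "graphql",
-- }
--
-- _DEPLOY_TARGET_TO_DOMAIN: dict[str, str] = {
--     "fly.io": "fly-workers",
--     "aws": "aws",
--     "gcp": "gcp",
--     "azure": "azure",
--     "render": "render",
-- }
--
-- def _extract_domains(
--     integrations: list[str],
--     build_target: str | None,
--     deploy_target: str | None,
-- ) -> list[str]:
--     """Map intent fields to researchable domain slugs."""
--     domains: list[str] = []
--
--     for integration in integrations:
--         slug = _INTEGRATION_TO_DOMAIN.get(integration.lower(), f"{integration.lower()}-api")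
--         if slug not in domains:
--             domains.append(slug)
--
--     if build_target:
--         slug = _BUILD_TARGET_TO_DOMAIN.get(build_target.lower())
--         if not slug:
--             # Unknown build target — use the raw value as a domain slug so it still gets researched
--             slug = build_target.lower().replace(" ", "-")
--         if slug not in domains:
--             domains.append(slug)
--
--     if deploy_target:
--         slug = _DEPLOY_TARGET_TO_DOMAIN.get(deploy_target.lower())
--         if slug and slug not in domains:
--             domains.append(slug)
--
--     return domains or ["python"]
-- ===== SOURCE B (Python) =====
-- _INTEGRATION_TO_DOMAIN: dict[str, str] = {
--     "perplexity": "perplexity-api",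
--     "openai": "openai-api",
--     "github": "github-api",
--     "slack": "slack-api",
--     "stripe": "stripe-api",
--     "postgres": "postgres",
--     "redis": "redis-state",
--     "anthropic": "anthropic-sdk",
--     "fly": "fly-workers",
--     "docker": "docker",
-- }
--
-- _BUILD_TARGET_TO_DOMAIN: dict[str, str] = {
--     "mcp-server": "mcp-protocol",
--     "rest-api": "fastapi",
--     "cli-tool": "python-cli",
--     "web-app": "fastapi",
--     "python-library": "python-library",
--     "graphql-api": "graphql",
-- }
--
-- _DEPLOY_TARGET_TO_DOMAIN: dict[str, str] = {
--     "fly.io": "fly-workers",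
--     "aws": "aws",
--     "gcp": "gcp",
--     "azure": "azure",
--     "render": "render",
-- }
--
--
-- def _build_slugs(build_target):
--     """Zero- or one-element candidate list for the build target."""
--     if not build_target:
--         return []
--     bt = build_target.lower()
--     return [_BUILD_TARGET_TO_DOMAIN.get(bt, bt.replace(" ", "-"))]
--
--
-- def _deploy_slugs(deploy_target):
--     """Zero- or one-element candidate list; unknown deploy targets are dropped."""
--     if not deploy_target:
--         return []
--     slug = _DEPLOY_TARGET_TO_DOMAIN.get(deploy_target.lower())
--     return [slug] if slug is not None else []
--
--
-- def _dedup(xs):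
--     """Ordered dedup by recursion: keep the head, filter it out of the tail."""
--     if not xs:
--         return []
--     head = xs[0]
--     return [head] + _dedup([y for y in xs[1:] if y != head])
--
--
-- def _extract_domains(integrations, build_target, deploy_target):
--     """Concatenate the three candidate sources, then recursively deduplicate."""
--     candidates = (
--         [_INTEGRATION_TO_DOMAIN.get(i.lower(), i.lower() + "-api") for i in integrations]
--         + _build_slugs(build_target)
--         + _deploy_slugs(deploy_target)
--     )
--     return _dedup(candidates) or ["python"]
-- ===== Notes on version B (the rewrite author's own statement) =====
-- stated objective: alternative
-- what changed: B replaces A's interleaved check-then-append loop by three independent candidate-source helpers concatenated into one flat list, then a recursive filter-based dedup (keep the head, filter it out of the tail) instead of a membership test against the growing output.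
import Mathlib
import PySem

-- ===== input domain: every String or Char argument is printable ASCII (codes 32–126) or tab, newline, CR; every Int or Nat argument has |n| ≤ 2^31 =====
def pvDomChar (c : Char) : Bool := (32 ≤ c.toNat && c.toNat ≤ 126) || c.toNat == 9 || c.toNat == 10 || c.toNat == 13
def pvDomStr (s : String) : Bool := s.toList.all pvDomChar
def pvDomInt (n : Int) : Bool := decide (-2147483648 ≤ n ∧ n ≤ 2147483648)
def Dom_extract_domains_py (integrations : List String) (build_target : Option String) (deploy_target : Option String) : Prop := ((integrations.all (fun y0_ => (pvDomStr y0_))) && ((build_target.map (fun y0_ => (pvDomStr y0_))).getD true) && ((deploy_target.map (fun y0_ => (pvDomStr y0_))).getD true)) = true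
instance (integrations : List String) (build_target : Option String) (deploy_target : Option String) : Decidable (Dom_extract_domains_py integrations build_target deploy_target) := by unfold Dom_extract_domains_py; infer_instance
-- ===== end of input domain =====

-- B concatenates three independent candidate-source lists and deduplicates them with a
-- recursive filter-based pass, instead of A's interleaved membership-check loop (no speed claim).

-- ===== PORT A =====
-- the three module-level mapping dicts (shared context of both versions)
def integrationToDomain : PySem.Dict String String := PySem.Dict.ofList
  [("perplexity", "perplexity-api"), ("openai", "openai-api"), ("github", "github-api"),
   ("slack", "slack-api"), ("stripe", "stripe-api"), ("postgres", "postgres"),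
   ("redis", "redis-state"), ("anthropic", "anthropic-sdk"), ("fly", "fly-workers"),
   ("docker", "docker")]

def buildTargetToDomain : PySem.Dict String String := PySem.Dict.ofList
  [("mcp-server", "mcp-protocol"), ("rest-api", "fastapi"), ("cli-tool", "python-cli"),
   ("web-app", "fastapi"), ("python-library", "python-library"), ("graphql-api", "graphql")]

def deployTargetToDomain : PySem.Dict String String := PySem.Dict.ofList
  [("fly.io", "fly-workers"), ("aws", "aws"), ("gcp", "gcp"), ("azure", "azure"),
   ("render", "render")]

def extract_domains_py (integrations : List String) (build_target : Option String) (deploy_target : Option String) : List String :=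
  -- for integration in integrations: slug = dict.get(..., f"{...}-api"); if slug not in domains: append
  let domains : List String := integrations.foldl (fun domains integration =>
    let slug := integrationToDomain.getD (PySem.Str.lower integration)
                  (PySem.Str.lower integration ++ "-api")
    if domains.contains slug then domains else domains ++ [slug]) []
  -- if build_target: (falsy = None or "")
  let domains : List String := match build_target with
    | none => domains
    | some bt =>
      if bt = "" then domains else
        -- slug = dict.get(key); if not slug: slug = fallback
        let slug := match buildTargetToDomain.get? (PySem.Str.lower bt) with
          | none => PySem.Str.replace (PySem.Str.lower bt) " " "-"
          | some s => if s = "" then PySem.Str.replace (PySem.Str.lower bt) " " "-" else s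
        if domains.contains slug then domains else domains ++ [slug]
  -- if deploy_target:
  let domains : List String := match deploy_target with
    | none => domains
    | some dt =>
      if dt = "" then domains else
        -- slug = dict.get(key); if slug and slug not in domains: append
        match deployTargetToDomain.get? (PySem.Str.lower dt) with
        | none => domains
        | some s => if s = "" then domains
                    else if domains.contains s then domains else domains ++ [s]
  -- return domains or ["python"]
  if domains = [] then ["python"] else domains

-- ===== PORT B =====
-- _build_slugs: zero- or one-element candidate list for the build target
def buildSlugs : Option String → List String
  | none => []
  | some bt =>
    if bt = "" then [] else
      [buildTargetToDomain.getD (PySem.Str.lower bt)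
         (PySem.Str.replace (PySem.Str.lower bt) " " "-")]

-- _deploy_slugs: zero- or one-element candidate list; unknown deploy targets dropped
def deploySlugs : Option String → List String
  | none => []
  | some dt =>
    if dt = "" then [] else
      match deployTargetToDomain.get? (PySem.Str.lower dt) with
      | none => []
      | some s => [s]

-- _dedup: ordered dedup by recursion — keep the head, filter it out of the tail
def dedupRec : List String → List String
  | [] => []
  | x :: xs => x :: dedupRec (xs.filter (fun y => y ≠ x))
termination_by xs => xs.length
decreasing_by
  simp only [List.length_cons, List.length_unattach]
  exact Nat.lt_succ_of_le (le_trans (List.length_filter_le _ _) (by simp))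

def extract_domains_py_alt (integrations : List String) (build_target : Option String) (deploy_target : Option String) : List String :=
  let candidates : List String :=
    integrations.map (fun i =>
      integrationToDomain.getD (PySem.Str.lower i) (PySem.Str.lower i ++ "-api"))
    ++ buildSlugs build_target ++ deploySlugs deploy_target
  let result := dedupRec candidates
  if result = [] then ["python"] else result

-- ===== PRECONDITION & SPEC =====
def Spec_extract_domains_py (integrations : List String) (build_target : Option String) (deploy_target : Option String) (out : List String) : Prop := out = extract_domains_py_alt integrations build_target deploy_target
instance (integrations : List String) (build_target : Option String) (deploy_target : Option String) (out : List String) : Decidable (Spec_extract_domains_py integrations build_target deploy_target out) := by unfold Spec_extract_domains_py; infer_instance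

-- ===== CLAIM (what is proved, stated in full; the proofs are below) =====
def Claim_equal_extract_domains_py : Prop := ∀ (integrations : List String) (build_target : Option String) (deploy_target : Option String), Dom_extract_domains_py integrations build_target deploy_target → Spec_extract_domains_py integrations build_target deploy_target (extract_domains_py integrations build_target deploy_target)

-- ===== LEMMAS AND PROOFS =====

-- every value stored in the two target dicts is a nonempty slug
lemma buildVal_ne_empty (k s : String) (h : buildTargetToDomain.get? k = some s) : s ≠ "" := by
  have hm : (k, s) ∈ buildTargetToDomain.items :=
    PySem.Dict.mem_items_of_get?_eq_some _ h
  have hitems : buildTargetToDomain.items = [("mcp-server", "mcp-protocol"), ("rest-api", "fastapi"),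
      ("cli-tool", "python-cli"), ("web-app", "fastapi"), ("python-library", "python-library"),
      ("graphql-api", "graphql")] := by rfl
  rw [hitems] at hm
  intro hs; subst hs; simp at hm

lemma deployVal_ne_empty (k s : String) (h : deployTargetToDomain.get? k = some s) : s ≠ "" := by
  have hm : (k, s) ∈ deployTargetToDomain.items :=
    PySem.Dict.mem_items_of_get?_eq_some _ h
  have hitems : deployTargetToDomain.items = [("fly.io", "fly-workers"), ("aws", "aws"),
      ("gcp", "gcp"), ("azure", "azure"), ("render", "render")] := by rfl
  rw [hitems] at hm
  intro hs; subst hs; simp at hm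

-- A's check-then-append step started from accumulator d equals d followed by the recursive
-- dedup of the not-yet-seen candidates
lemma foldl_step_eq_dedupRec (xs d : List String) :
    xs.foldl (fun domains slug =>
      if domains.contains slug then domains else domains ++ [slug]) d
    = d ++ dedupRec (xs.filter (fun y => !d.contains y)) := by
  induction xs generalizing d with
  | nil => simp [dedupRec]
  | cons x xs ih =>
    by_cases hx : d.contains x = true
    · simp only [List.foldl_cons, List.filter_cons, hx, if_true, Bool.not_true,
        Bool.false_eq_true, if_false]
      exact ih d
    · have hx' : d.contains x = false := by simpa using hx
      simp only [List.foldl_cons, List.filter_cons, hx', Bool.false_eq_true, if_false,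
        Bool.not_false, if_true]
      rw [ih (d ++ [x]), dedupRec]
      have hfil : xs.filter (fun y => !(d ++ [x]).contains y)
          = (xs.filter (fun y => !d.contains y)).filter (fun y => y ≠ x) := by
        rw [List.filter_filter]
        apply List.filter_congr
        intro y _
        simp [eq_comm, Bool.and_comm]
      rw [hfil]
      simp

-- the loop started empty computes exactly dedupRec
lemma foldl_eq_dedupRec (xs : List String) :
    xs.foldl (fun domains slug =>
      if domains.contains slug then domains else domains ++ [slug]) []
    = dedupRec xs := by
  simpa using foldl_step_eq_dedupRec xs []

-- A's integration loop = dedupRec of the mapped candidate list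
lemma loop_eq_dedupRec (f : String → String) (xs : List String) :
    xs.foldl (fun domains i =>
      let slug := f i
      if domains.contains slug then domains else domains ++ [slug]) []
    = dedupRec (xs.map f) := by
  have h := foldl_eq_dedupRec (xs.map f)
  rw [List.foldl_map] at h
  exact h

-- one conditional membership-append on an already-deduplicated list = dedup of one more candidate
lemma dedupRec_snoc (xs : List String) (y : String) :
    (if (dedupRec xs).contains y then dedupRec xs
     else dedupRec xs ++ [y]) = dedupRec (xs ++ [y]) := by
  simp only [← foldl_eq_dedupRec, List.foldl_append]
  simp [List.foldl]

-- ===== VERDICT (by name: the statement is the Claim_ definition above) =====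
theorem extract_domains_py_spec : Claim_equal_extract_domains_py := by
  intro ints bt dt _
  show extract_domains_py ints bt dt = extract_domains_py_alt ints bt dt
  unfold extract_domains_py extract_domains_py_alt buildSlugs deploySlugs
  rcases bt with _ | b <;> rcases dt with _ | d <;>
    simp only [loop_eq_dedupRec, PySem.Dict.getD_eq_get?_getD, List.append_nil]
  -- remaining goals: deploy only, build only, build and deploy
  · by_cases hd : d = ""
    · simp [hd]
    · simp only [if_neg hd]
      cases hds : deployTargetToDomain.get? (PySem.Str.lower d) with
      | none => simp
      | some s =>
        simp only [if_neg (deployVal_ne_empty _ _ hds), dedupRec_snoc]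
  · by_cases hb : b = ""
    · simp [hb]
    · simp only [if_neg hb]
      cases hbs : buildTargetToDomain.get? (PySem.Str.lower b) with
      | none => simp only [Option.getD_none, dedupRec_snoc]
      | some s =>
        simp only [if_neg (buildVal_ne_empty _ _ hbs), Option.getD_some, dedupRec_snoc]
  · by_cases hb : b = ""
    · simp only [if_pos hb]
      by_cases hd : d = ""
      · simp [hd]
      · simp only [if_neg hd, List.append_nil]
        cases hds : deployTargetToDomain.get? (PySem.Str.lower d) with
        | none => simp
        | some s =>
          simp only [if_neg (deployVal_ne_empty _ _ hds), dedupRec_snoc]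
    · simp only [if_neg hb]
      by_cases hd : d = ""
      · simp only [if_pos hd, List.append_nil]
        cases hbs : buildTargetToDomain.get? (PySem.Str.lower b) with
        | none => simp only [Option.getD_none, dedupRec_snoc]
        | some s =>
          simp only [if_neg (buildVal_ne_empty _ _ hbs), Option.getD_some, dedupRec_snoc]
      · simp only [if_neg hd]
        cases hbs : buildTargetToDomain.get? (PySem.Str.lower b) with
        | none =>
          simp only [Option.getD_none, dedupRec_snoc]
          cases hds : deployTargetToDomain.get? (PySem.Str.lower d) with
          | none => simp
          | some s =>
            simp only [if_neg (deployVal_ne_empty _ _ hds), dedupRec_snoc]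
        | some s =>
          simp only [if_neg (buildVal_ne_empty _ _ hbs), Option.getD_some, dedupRec_snoc]
          cases hds : deployTargetToDomain.get? (PySem.Str.lower d) with
          | none => simp
          | some s2 =>
            simp only [if_neg (deployVal_ne_empty _ _ hds), dedupRec_snoc]
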